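-- pv_equiv track=rewrite | github.com/SelimOzel/ProjectEuler | Problem009.py | Triplet
-- ===== SOURCE A (Python) =====
-- def Triplet(input):
-- 	x = 1
-- 	while(x*x <= input):
-- 		y = 1
-- 		while(y*y <= input):
-- 			if (x*x + y*y == input):
-- 				return x, y
-- 			y += 1
-- 		x += 1
--
-- 	return -1, -1
-- ===== SOURCE B (Python) =====
-- def _isqrt(n):
--     # binary-search integer square root: largest lo with lo*lo <= n (n >= 0)
--     lo = 0
--     hi = n
--     while lo < hi:
--         mid = (lo + hi + 1) // 2
--         if mid * mid <= n:
--             lo = mid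
--         else:
--             hi = mid - 1
--     return lo
--
-- def Triplet(input):
--     x = 1
--     while x * x <= input:
--         r = input - x * x
--         y = _isqrt(r)
--         if y >= 1 and y * y == r:
--             return x, y
--         x += 1
--     return -1, -1
-- ===== Notes on version B (the rewrite author's own statement) =====
-- stated objective: faster
-- what changed: A's inner linear scan over all y with y*y<=input is replaced by computing y = isqrt(input - x*x) via binary search and testing it for a perfect square.
import Mathlib
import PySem

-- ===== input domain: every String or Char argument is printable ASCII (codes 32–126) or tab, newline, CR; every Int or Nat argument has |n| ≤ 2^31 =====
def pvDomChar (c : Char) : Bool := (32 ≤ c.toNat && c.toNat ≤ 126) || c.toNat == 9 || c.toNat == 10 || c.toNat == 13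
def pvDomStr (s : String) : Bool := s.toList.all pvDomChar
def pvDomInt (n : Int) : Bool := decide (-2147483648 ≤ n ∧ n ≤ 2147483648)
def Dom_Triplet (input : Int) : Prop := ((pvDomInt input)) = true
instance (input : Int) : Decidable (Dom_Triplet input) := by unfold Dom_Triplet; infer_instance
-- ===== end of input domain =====

-- B replaces A's linear inner scan over y by a binary-search integer square root of input - x*x.
-- Loops are ported as structural recursion on a fuel that provably never runs out (a totality guard only).

-- ===== PORT A =====
-- inner while loop: y from its current value while y*y <= input
def TripletInnerA (input : Int) : Nat → Int → Int → Option (List Int)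
  | 0, _, _ => none   -- fuel exhausted: unreachable for the fuel Triplet supplies
  | fuel + 1, x, y =>
    if y * y ≤ input then
      if x * x + y * y = input then some [x, y]
      else TripletInnerA input fuel x (y + 1)
    else none

-- outer while loop: x from its current value while x*x <= input
def TripletOuterA (input : Int) : Nat → Int → List Int
  | 0, _ => [-1, -1]  -- fuel exhausted: unreachable for the fuel Triplet supplies
  | fuel + 1, x =>
    if x * x ≤ input then
      match TripletInnerA input (input.toNat + 1) x 1 with
      | some p => p
      | none => TripletOuterA input fuel (x + 1)
    else [-1, -1]

def Triplet (input : Int) : List Int := TripletOuterA input (input.toNat + 1) 1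

-- ===== PORT B =====
-- binary-search isqrt loop from Source B's _isqrt
def IsqrtLoop (n : Int) : Nat → Int → Int → Int
  | 0, lo, _ => lo   -- fuel exhausted: unreachable for the fuel isqrtB supplies
  | fuel + 1, lo, hi =>
    if lo < hi then
      let mid := PySem.Int.floordiv (lo + hi + 1) 2
      if mid * mid ≤ n then IsqrtLoop n fuel mid hi
      else IsqrtLoop n fuel lo (mid - 1)
    else lo

def isqrtB (n : Int) : Int := IsqrtLoop n (n.toNat + 1) 0 n

-- outer while loop of Source B
def TripletOuterB (input : Int) : Nat → Int → List Int
  | 0, _ => [-1, -1]  -- fuel exhausted: unreachable for the fuel Triplet_alt supplies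
  | fuel + 1, x =>
    if x * x ≤ input then
      let r := input - x * x
      let y := isqrtB r
      if 1 ≤ y ∧ y * y = r then [x, y]
      else TripletOuterB input fuel (x + 1)
    else [-1, -1]

def Triplet_alt (input : Int) : List Int := TripletOuterB input (input.toNat + 1) 1

-- ===== PRECONDITION & SPEC =====
def Spec_Triplet (input : Int) (out : List Int) : Prop := out = Triplet_alt input
instance (input : Int) (out : List Int) : Decidable (Spec_Triplet input out) := by unfold Spec_Triplet; infer_instance

-- ===== CLAIM (what is proved, stated in full; the proofs are below) =====
def Claim_equal_Triplet : Prop := ∀ (input : Int), Dom_Triplet input → Spec_Triplet input (Triplet input)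

-- ===== LEMMAS AND PROOFS =====

-- the isqrt loop invariant: with enough fuel and 0 ≤ lo ≤ hi, lo*lo ≤ n < (hi+1)*(hi+1),
-- the loop returns the integer square root of n
theorem IsqrtLoop_correct (n : Int) : ∀ f : Nat, ∀ lo hi : Int, (hi - lo).toNat < f →
    0 ≤ lo → lo ≤ hi → lo * lo ≤ n → n < (hi + 1) * (hi + 1) →
    0 ≤ IsqrtLoop n f lo hi ∧ IsqrtLoop n f lo hi * IsqrtLoop n f lo hi ≤ n ∧
      n < (IsqrtLoop n f lo hi + 1) * (IsqrtLoop n f lo hi + 1) := by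
  intro f
  induction f with
  | zero => intro lo hi hf; omega
  | succ f ih =>
    intro lo hi hf h0 hle hlo hhi
    rw [IsqrtLoop]
    by_cases h : lo < hi
    · rw [if_pos h]
      have hmid : PySem.Int.floordiv (lo + hi + 1) 2 = (lo + hi + 1) / 2 :=
        PySem.Int.floordiv_eq_ediv_of_pos (by omega)
      set mid := PySem.Int.floordiv (lo + hi + 1) 2 with hm
      have hb1 : lo < mid := by omega
      have hb2 : mid ≤ hi := by omega
      by_cases hmm : mid * mid ≤ n
      · rw [if_pos hmm]
        exact ih mid hi (by omega) (by omega) hb2 hmm hhi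
      · rw [if_neg hmm]
        exact ih lo (mid - 1) (by omega) h0 (by omega) hlo (by linarith [not_le.1 hmm])
    · rw [if_neg h]
      have : lo = hi := le_antisymm hle (le_of_not_gt h)
      subst this
      exact ⟨h0, hlo, hhi⟩

theorem isqrtB_correct (n : Int) (hn : 0 ≤ n) :
    0 ≤ isqrtB n ∧ isqrtB n * isqrtB n ≤ n ∧ n < (isqrtB n + 1) * (isqrtB n + 1) := by
  unfold isqrtB
  exact IsqrtLoop_correct n (n.toNat + 1) 0 n (by omega) le_rfl hn (by simpa using hn)
    (by nlinarith)

-- A's inner scan hits a solution: if 1 ≤ y ≤ s and s*s = input - x*x, the scan from y returns [x, s]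
theorem innerA_finds (input x s : Int) (hs : s * s = input - x * x) :
    ∀ f : Nat, ∀ y : Int, (input + 1 - y).toNat < f → 1 ≤ y → y ≤ s →
      TripletInnerA input f x y = some [x, s] := by
  intro f
  induction f with
  | zero =>
    intro y hf h1 hys
    have hx2 : (0:Int) ≤ x * x := mul_self_nonneg x
    have : s ≤ input := by nlinarith
    omega
  | succ f ih =>
    intro y hf h1 hys
    rw [TripletInnerA]
    have hx2 : (0:Int) ≤ x * x := mul_self_nonneg x
    have hyy : y * y ≤ input := by nlinarith
    rw [if_pos hyy]
    by_cases heq : x * x + y * y = input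
    · have hns : ¬ y < s := fun hlt => by nlinarith
      have hy_s : y = s := le_antisymm hys (not_lt.1 hns)
      rw [if_pos heq, hy_s]
    · have hne : y ≠ s := fun h => heq (by rw [h]; omega)
      have hy : y ≤ input := by nlinarith
      rw [if_neg heq]
      exact ih (y + 1) (by omega) (by omega) (by omega)

-- A's inner scan finds nothing when no y ≥ 1 squares to input - x*x
theorem innerA_none (input x : Int) (hno : ∀ y : Int, 1 ≤ y → x * x + y * y ≠ input) :
    ∀ f : Nat, ∀ y : Int, (input + 1 - y).toNat < f → 1 ≤ y →
      TripletInnerA input f x y = none := by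
  intro f
  induction f with
  | zero =>
    intro y hf h1
    rw [TripletInnerA]
  | succ f ih =>
    intro y hf h1
    rw [TripletInnerA]
    by_cases hyy : y * y ≤ input
    · rw [if_pos hyy, if_neg (hno y h1)]
      have hy : y ≤ input := by nlinarith
      exact ih (y + 1) (by omega) (by omega)
    · rw [if_neg hyy]

-- per-x equivalence of the two loop bodies
theorem inner_eq (input x : Int) (hx : x * x ≤ input) :
    TripletInnerA input (input.toNat + 1) x 1 =
      (if 1 ≤ isqrtB (input - x * x) ∧
          isqrtB (input - x * x) * isqrtB (input - x * x) = input - x * x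
       then some [x, isqrtB (input - x * x)] else none) := by
  have hr : (0:Int) ≤ input - x * x := by nlinarith [mul_self_nonneg x]
  obtain ⟨hs0, hs1, hs2⟩ := isqrtB_correct (input - x * x) hr
  set s := isqrtB (input - x * x) with hsdef
  by_cases hc : 1 ≤ s ∧ s * s = input - x * x
  · rw [if_pos hc]
    exact innerA_finds input x s hc.2 (input.toNat + 1) 1 (by omega) le_rfl hc.1
  · rw [if_neg hc]
    refine innerA_none input x (fun y h1 heq => ?_) (input.toNat + 1) 1 (by omega) le_rfl
    have hy2 : y * y = input - x * x := by omega
    have h_ys : s ≤ y := by nlinarith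
    have h_sy : y ≤ s := by nlinarith
    have : y = s := le_antisymm h_sy h_ys
    exact hc ⟨by omega, by rw [← this]; exact hy2⟩

-- the two outer loops agree step by step
theorem outer_eq (input : Int) : ∀ f : Nat, ∀ x : Int, (input + 1 - x).toNat < f →
    TripletOuterA input f x = TripletOuterB input f x := by
  intro f
  induction f with
  | zero => intro x hf; rw [TripletOuterA, TripletOuterB]
  | succ f ih =>
    intro x hf
    rw [TripletOuterA, TripletOuterB]
    by_cases hx : x * x ≤ input
    · rw [if_pos hx, if_pos hx, inner_eq input x hx]
      simp only []
      by_cases hc : 1 ≤ isqrtB (input - x * x) ∧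
          isqrtB (input - x * x) * isqrtB (input - x * x) = input - x * x
      · rw [if_pos hc, if_pos hc]
      · rw [if_neg hc, if_neg hc]
        have hxle : x ≤ input := by nlinarith [mul_self_nonneg x]
        exact ih (x + 1) (by omega)
    · rw [if_neg hx, if_neg hx]

-- ===== VERDICT (by name: the statement is the Claim_ definition above) =====
theorem Triplet_spec : Claim_equal_Triplet := by
  intro input _
  unfold Spec_Triplet Triplet Triplet_alt
  exact outer_eq input (input.toNat + 1) 1 (by omega)
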